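-- pv_equiv track=rewrite | github.com/Libre-SOC-mirrors/soc | src/decoder/power_fields.py | decode_line
-- ===== SOURCE A (Python) =====
-- def decode_line(header, line):
--     line = line.strip()
--     res = {}
--     count = 0
--     print ("line", line)
--     prev_fieldname = None
--     for f in line.split("|"):
--         if not f:
--             continue
--         end = count + len(f) + 1
--         fieldname = f.strip()
--         if not fieldname or fieldname.startswith('/'):
--             if prev_fieldname is not None:
--                 res[prev_fieldname] = (res[prev_fieldname], header[count])
--                 prev_fieldname = None
--             count = end
--             continue
--         bitstart = header[count]
--         if prev_fieldname is not None:
--             res[prev_fieldname] = (res[prev_fieldname], bitstart)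
--         res[fieldname] = bitstart
--         count = end
--         prev_fieldname = fieldname
--     res[prev_fieldname] = (bitstart, 32)
--     return res
-- ===== SOURCE B (Python) =====
-- def decode_line(header, line):
--     line = line.strip()
--     print("line", line)
--     # pass 1: tokenize into (offset, stripped-name) records
--     recs = []
--     count = 0
--     for f in line.split("|"):
--         if f:
--             recs.append((count, f.strip()))
--             count += len(f) + 1
--     # pass 2: each real field starts at header[its offset] and ends at
--     # header[next record's offset] (32 for the last record)
--     nexts = [c for c, _ in recs[1:]] + [None]
--     res = {}
--     for (c, name), nxt in zip(recs, nexts):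
--         if name and not name.startswith('/'):
--             res[name] = (header[c], 32 if nxt is None else header[nxt])
--     return res
-- ===== Notes on version B (the rewrite author's own statement) =====
-- stated objective: simpler
-- what changed: A is a one-pass state machine threading a pending field, its start bit and a running offset through the loop and closing each field one token later; B first tokenizes the line into (offset, name) records and then zips each record with the next record's offset, so every real field is written exactly once as (header[offset], header[next offset] or 32) with no pending state.
-- outside the precondition, e.g. on decode_line([0, 1, 2], 'a|/'): A returns {'a': (0, 2), None: (0, 32)}, B returns {'a': (0, 2)}
import Mathlib
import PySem

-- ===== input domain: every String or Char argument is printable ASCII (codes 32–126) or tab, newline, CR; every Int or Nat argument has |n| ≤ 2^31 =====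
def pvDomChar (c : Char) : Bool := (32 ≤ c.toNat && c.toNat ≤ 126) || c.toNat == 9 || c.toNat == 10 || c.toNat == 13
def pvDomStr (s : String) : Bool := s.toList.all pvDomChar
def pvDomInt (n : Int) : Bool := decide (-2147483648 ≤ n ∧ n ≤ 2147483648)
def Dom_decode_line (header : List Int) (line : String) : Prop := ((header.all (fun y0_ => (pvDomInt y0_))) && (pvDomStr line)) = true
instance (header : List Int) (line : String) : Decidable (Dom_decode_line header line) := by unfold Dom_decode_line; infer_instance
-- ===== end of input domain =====

-- B replaces A's one-pass pending-field state machine by tokenize-then-zip-with-next lookahead (simpler; return value only — both keep A's print).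

-- header[c] (Pre_ keeps every accessed offset in range, so the default is never read)
def pvH (header : List Int) (c : Int) : Int := (PySem.List.pyGet? header c).getD 0

-- ===== PORT A =====
-- Python reads res[p] back where its value is the int written at p's own step
def pvUnA (v : Int ⊕ Int × Int) : Int :=
  match v with
  | Sum.inl x => x
  | Sum.inr x => x.1

-- A's loop body: state = (res, count, prev_fieldname, bitstart)
def pvAStep (header : List Int)
    (st : PySem.Dict String (Int ⊕ Int × Int) × Int × Option String × Int) (f : String) :
    PySem.Dict String (Int ⊕ Int × Int) × Int × Option String × Int :=
  if f = "" then st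
  else
    let res := st.1
    let count := st.2.1
    let prev := st.2.2.1
    let bitstart := st.2.2.2
    let fend := count + PySem.Str.len f + 1
    let fieldname := PySem.Str.strip f
    if fieldname = "" ∨ PySem.Str.startswith fieldname "/" = true then
      match prev with
      | some p => (res.insert p (Sum.inr (pvUnA (res.getD p (Sum.inl 0)), pvH header count)), fend, none, bitstart)
      | none => (res, fend, none, bitstart)
    else
      let b := pvH header count
      let res1 :=
        match prev with
        | some p => res.insert p (Sum.inr (pvUnA (res.getD p (Sum.inl 0)), b))
        | none => res
      (res1.insert fieldname (Sum.inl b), fend, some fieldname, b)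

-- A's post-loop close res[prev_fieldname] = (bitstart, 32) and the dict-to-items view;
-- prev = None (Python's non-String key res[None]) is outside Pre_
def pvAFinal (header : List Int)
    (st : PySem.Dict String (Int ⊕ Int × Int) × Option String × Int) : List (String × Int × Int) :=
  (match st.2.1 with
    | some p => st.1.insert p (Sum.inr (st.2.2, 32))
    | none => st.1).items.map (fun (kv : String × (Int ⊕ Int × Int)) =>
      match kv.2 with
      | Sum.inl b => (kv.1, b, 32)
      | Sum.inr e => (kv.1, e.1, e.2))

def decode_line (header : List Int) (line : String) : List (String × Int × Int) :=
  let line := PySem.Str.strip line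
  -- print("line", line): no effect on the return value
  let st := ((PySem.Str.split? line "|").getD []).foldl (pvAStep header) (PySem.Dict.mk [], 0, none, 0)
  pvAFinal header (st.1, st.2.2.1, st.2.2.2)

-- ===== PORT B =====
-- pass 1: tokenize into (offset, stripped-name) records
def pvTokStep (st : List (Int × String) × Int) (f : String) : List (Int × String) × Int :=
  if f = "" then st
  else (st.1 ++ [(st.2, PySem.Str.strip f)], st.2 + PySem.Str.len f + 1)

def pvRecs (line : String) : List (Int × String) :=
  ((((PySem.Str.split? (PySem.Str.strip line) "|")).getD []).foldl pvTokStep ([], 0)).1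

-- Python: 32 if nxt is None else header[nxt]
def pvEndOf (header : List Int) (o : Option Int) : Int :=
  match o with
  | none => 32
  | some n => pvH header n

-- pass 2 body: a real field is written once, ended by the next record's offset (32 for the last)
def pvZStep (header : List Int) (res : PySem.Dict String (Int × Int))
    (rn : (Int × String) × Option Int) : PySem.Dict String (Int × Int) :=
  if rn.1.2 ≠ "" ∧ ¬ PySem.Str.startswith rn.1.2 "/" = true then
    res.insert rn.1.2 (pvH header rn.1.1, pvEndOf header rn.2)
  else res

def decode_line_alt (header : List Int) (line : String) : List (String × Int × Int) :=
  let recs := pvRecs line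
  let nexts := (recs.drop 1).map (fun r => some r.1) ++ [(none : Option Int)]
  ((recs.zip nexts).foldl (pvZStep header) (PySem.Dict.mk [])).items

-- ===== PRECONDITION & SPEC =====
def pvIsReal (r : Int × String) : Bool := (!(r.2 == "")) && (!(PySem.Str.startswith r.2 "/"))

def pvLastReal (o : Option (Int × String)) : Bool :=
  match o with
  | none => false
  | some r => pvIsReal r

-- Pre_ excludes inputs where A raises (IndexError on an out-of-range header offset,
-- UnboundLocalError when the line has no real field) and lines whose last token is
-- filler, where A's returned dict carries the non-String key None.
def Pre_decode_line (header : List Int) (line : String) : Prop :=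
  pvLastReal (pvRecs line).getLast? = true ∧
  (∀ r ∈ pvRecs line, pvIsReal r = true → r.1 < (header.length : Int)) ∧
  (∀ p ∈ (pvRecs line).zip ((pvRecs line).drop 1), pvIsReal p.1 = true → p.2.1 < (header.length : Int))

instance (header : List Int) (line : String) : Decidable (Pre_decode_line header line) := by
  unfold Pre_decode_line; infer_instance

def pvWitness_decode_line : List Int × String := ([0, 1, 2], "a|b")

def Spec_decode_line (header : List Int) (line : String) (out : List (String × Int × Int)) : Prop := out = decode_line_alt header line
instance (header : List Int) (line : String) (out : List (String × Int × Int)) : Decidable (Spec_decode_line header line out) := by unfold Spec_decode_line; infer_instance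

-- ===== CLAIM (what is proved, stated in full; the proofs are below) =====
def Claim_equal_decode_line : Prop := ∀ (header : List Int) (line : String), Dom_decode_line header line → Pre_decode_line header line → Spec_decode_line header line (decode_line header line)


-- ===== LEMMAS AND PROOFS =====

-- A's loop state with the running offset dropped (the records carry it instead)
def pvDropC (st : PySem.Dict String (Int ⊕ Int × Int) × Int × Option String × Int) :
    PySem.Dict String (Int ⊕ Int × Int) × Option String × Int :=
  (st.1, st.2.2.1, st.2.2.2)

-- A's loop body re-read over a record (offset, name)
def pvStepR (header : List Int)
    (st : PySem.Dict String (Int ⊕ Int × Int) × Option String × Int) (r : Int × String) :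
    PySem.Dict String (Int ⊕ Int × Int) × Option String × Int :=
  if r.2 = "" ∨ PySem.Str.startswith r.2 "/" = true then
    match st.2.1 with
    | some p => (st.1.insert p (Sum.inr (pvUnA (st.1.getD p (Sum.inl 0)), pvH header r.1)), none, st.2.2)
    | none => (st.1, none, st.2.2)
  else
    let b := pvH header r.1
    let res1 :=
      match st.2.1 with
      | some p => st.1.insert p (Sum.inr (pvUnA (st.1.getD p (Sum.inl 0)), b))
      | none => st.1
    (res1.insert r.2 (Sum.inl b), some r.2, b)

def pvMapInr (d : PySem.Dict String (Int × Int)) : PySem.Dict String (Int ⊕ Int × Int) :=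
  PySem.Dict.mk (d.items.map (fun kv => (kv.1, Sum.inr kv.2)))

def pvEncode (d : PySem.Dict String (Int × Int)) (pend : Option (String × Int)) :
    PySem.Dict String (Int ⊕ Int × Int) :=
  match pend with
  | none => pvMapInr d
  | some pb => (pvMapInr d).insert pb.1 (Sum.inl pb.2)

def pvOffHd (recs : List (Int × String)) : Option Int :=
  match recs with
  | [] => none
  | r :: _ => some r.1

def pvApplyPend (header : List Int) (d : PySem.Dict String (Int × Int))
    (pend : Option (String × Int)) (o : Option Int) : PySem.Dict String (Int × Int) :=
  match pend with
  | none => d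
  | some pb => d.insert pb.1 (pb.2, pvEndOf header o)

def pvZipN (recs : List (Int × String)) : List ((Int × String) × Option Int) :=
  recs.zip ((recs.drop 1).map (fun r => some r.1) ++ [(none : Option Int)])

def pvPrevOf (pend : Option (String × Int)) : Option String :=
  match pend with
  | none => none
  | some pb => some pb.1

def pvBitsOf (pend : Option (String × Int)) (bits : Int) : Int :=
  match pend with
  | none => bits
  | some pb => pb.2

lemma pvZipN_cons (r : Int × String) (rest : List (Int × String)) :
    pvZipN (r :: rest) = (r, pvOffHd rest) :: pvZipN rest := by
  cases rest <;> simp [pvZipN, pvOffHd]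

lemma pvAFinal_none (header : List Int) (res : PySem.Dict String (Int ⊕ Int × Int)) (bits : Int) :
    pvAFinal header (res, none, bits) = res.items.map (fun (kv : String × (Int ⊕ Int × Int)) =>
      match kv.2 with
      | Sum.inl b => (kv.1, b, 32)
      | Sum.inr e => (kv.1, e.1, e.2)) := rfl

lemma pvAFinal_some (header : List Int) (res : PySem.Dict String (Int ⊕ Int × Int))
    (p : String) (bits : Int) :
    pvAFinal header (res, some p, bits) = (res.insert p (Sum.inr (bits, 32))).items.map (fun (kv : String × (Int ⊕ Int × Int)) =>
      match kv.2 with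
      | Sum.inl b => (kv.1, b, 32)
      | Sum.inr e => (kv.1, e.1, e.2)) := rfl

lemma pvContains_mapInr (d : PySem.Dict String (Int × Int)) (k : String) :
    (pvMapInr d).contains k = d.contains k := by
  rw [PySem.Dict.contains_eq_decide_mem_keys, PySem.Dict.contains_eq_decide_mem_keys]
  simp [pvMapInr, PySem.Dict.keys, List.map_map, Function.comp]

lemma pvMapInr_insert (d : PySem.Dict String (Int × Int)) (k : String) (v : Int × Int) :
    (pvMapInr d).insert k (Sum.inr v) = pvMapInr (d.insert k v) := by
  have hitems : ∀ (e : PySem.Dict String (Int × Int)),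
      (pvMapInr e).items = e.items.map (fun kv => (kv.1, Sum.inr kv.2)) := fun _ => rfl
  apply PySem.Dict.ext
  by_cases hc : d.contains k = true
  · rw [PySem.Dict.items_insert, pvContains_mapInr, if_pos hc, hitems d,
      hitems (d.insert k v), PySem.Dict.items_insert, if_pos hc, List.map_map, List.map_map]
    refine List.map_congr_left ?_
    intro p _
    by_cases hpk : p.1 = k <;> simp [hpk, Function.comp]
  · rw [PySem.Dict.items_insert, pvContains_mapInr, if_neg hc, hitems d,
      hitems (d.insert k v), PySem.Dict.items_insert, if_neg hc, List.map_append]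
    rfl

lemma pvItems_mapInr (d : PySem.Dict String (Int × Int)) :
    (pvMapInr d).items.map (fun (kv : String × (Int ⊕ Int × Int)) =>
      match kv.2 with
      | Sum.inl b => (kv.1, b, 32)
      | Sum.inr e => (kv.1, e.1, e.2)) = d.items := by
  rw [show (pvMapInr d).items = d.items.map (fun kv => (kv.1, Sum.inr kv.2)) from rfl]
  rw [List.map_map]
  have : ((fun kv : String × (Int ⊕ Int × Int) =>
      match kv.2 with
      | Sum.inl b => (kv.1, b, 32)
      | Sum.inr e => (kv.1, e.1, e.2)) ∘ (fun kv : String × (Int × Int) => (kv.1, Sum.inr kv.2)))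
      = id := by
    funext kv; rfl
  rw [this, List.map_id]

lemma pvTok_append (pieces : List String) (acc : List (Int × String)) (count : Int) :
    pieces.foldl pvTokStep (acc, count)
      = (acc ++ (pieces.foldl pvTokStep ([], count)).1, (pieces.foldl pvTokStep ([], count)).2) := by
  induction pieces generalizing acc count with
  | nil => simp
  | cons f rest ih =>
    simp only [List.foldl_cons]
    by_cases hf : f = ""
    · simp only [pvTokStep, hf, if_pos]
      exact ih acc count
    · rw [show pvTokStep (acc, count) f
            = (acc ++ [(count, PySem.Str.strip f)], count + PySem.Str.len f + 1) from by
          simp [pvTokStep, hf],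
        show pvTokStep (([], count) : List (Int × String) × Int) f
            = ([(count, PySem.Str.strip f)], count + PySem.Str.len f + 1) from by
          simp [pvTokStep, hf]]
      rw [ih (acc ++ [(count, PySem.Str.strip f)]) (count + PySem.Str.len f + 1),
          ih [(count, PySem.Str.strip f)] (count + PySem.Str.len f + 1)]
      simp

lemma pvAStep_eq (header : List Int) (res : PySem.Dict String (Int ⊕ Int × Int)) (count : Int)
    (prev : Option String) (bits : Int) (f : String) (hf : ¬ f = "") :
    pvAStep header (res, count, prev, bits) f
      = ((pvStepR header (res, prev, bits) (count, PySem.Str.strip f)).1,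
         count + PySem.Str.len f + 1,
         (pvStepR header (res, prev, bits) (count, PySem.Str.strip f)).2.1,
         (pvStepR header (res, prev, bits) (count, PySem.Str.strip f)).2.2) := by
  rcases Decidable.em
      (PySem.Str.strip f = "" ∨ PySem.Str.startswith (PySem.Str.strip f) "/" = true) with hc | hc
  · cases prev <;> simp only [pvAStep, pvStepR, if_neg hf, if_pos hc]
  · cases prev <;> simp only [pvAStep, pvStepR, if_neg hf, if_neg hc]

lemma pvBridgeA (header : List Int) (pieces : List String) :
    ∀ (res : PySem.Dict String (Int ⊕ Int × Int)) (count : Int) (prev : Option String) (bits : Int),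
    pvDropC (pieces.foldl (pvAStep header) (res, count, prev, bits))
      = ((pieces.foldl pvTokStep ([], count)).1).foldl (pvStepR header) (res, prev, bits) := by
  induction pieces with
  | nil => intro res count prev bits; rfl
  | cons f rest ih =>
    intro res count prev bits
    simp only [List.foldl_cons]
    by_cases hf : f = ""
    · rw [show pvAStep header (res, count, prev, bits) f = (res, count, prev, bits) from by
          simp [pvAStep, hf],
        show pvTokStep (([], count) : List (Int × String) × Int) f = ([], count) from by
          simp [pvTokStep, hf]]
      exact ih res count prev bits
    · rw [pvAStep_eq header res count prev bits f hf,
        show pvTokStep (([], count) : List (Int × String) × Int) f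
            = ([(count, PySem.Str.strip f)], count + PySem.Str.len f + 1) from by
          simp [pvTokStep, hf]]
      rw [pvTok_append rest [(count, PySem.Str.strip f)] (count + PySem.Str.len f + 1)]
      simp only [List.cons_append, List.nil_append, List.foldl_cons]
      exact ih _ _ _ _

lemma pvZStep_skip (header : List Int) (res : PySem.Dict String (Int × Int)) (c : Int)
    (name : String) (o : Option Int)
    (h : name = "" ∨ PySem.Str.startswith name "/" = true) :
    pvZStep header res ((c, name), o) = res := by
  unfold pvZStep
  split
  · rename_i hx
    rcases h with h | h
    · exact absurd h hx.1
    · exact absurd h hx.2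
  · rfl

lemma pvZStep_real (header : List Int) (res : PySem.Dict String (Int × Int)) (c : Int)
    (name : String) (o : Option Int)
    (h : ¬(name = "" ∨ PySem.Str.startswith name "/" = true)) :
    pvZStep header res ((c, name), o) = res.insert name (pvH header c, pvEndOf header o) := by
  unfold pvZStep
  split
  · rfl
  · rename_i hx
    exact absurd ⟨fun hn => h (Or.inl hn), fun hsw => h (Or.inr hsw)⟩ hx

lemma pvStepR_fill_none (header : List Int) (res : PySem.Dict String (Int ⊕ Int × Int))
    (bits c : Int) (name : String)
    (h : name = "" ∨ PySem.Str.startswith name "/" = true) :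
    pvStepR header (res, none, bits) (c, name) = (res, none, bits) := by
  unfold pvStepR
  split
  · rfl
  · rename_i hx; exact absurd h hx

lemma pvStepR_fill_some (header : List Int) (res : PySem.Dict String (Int ⊕ Int × Int))
    (p : String) (bits c : Int) (name : String)
    (h : name = "" ∨ PySem.Str.startswith name "/" = true) :
    pvStepR header (res, some p, bits) (c, name)
      = (res.insert p (Sum.inr (pvUnA (res.getD p (Sum.inl 0)), pvH header c)), none, bits) := by
  unfold pvStepR
  split
  · rfl
  · rename_i hx; exact absurd h hx

lemma pvStepR_real_none (header : List Int) (res : PySem.Dict String (Int ⊕ Int × Int))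
    (bits c : Int) (name : String)
    (h : ¬(name = "" ∨ PySem.Str.startswith name "/" = true)) :
    pvStepR header (res, none, bits) (c, name)
      = (res.insert name (Sum.inl (pvH header c)), some name, pvH header c) := by
  unfold pvStepR
  split
  · rename_i hx; exact absurd hx h
  · rfl

lemma pvStepR_real_some (header : List Int) (res : PySem.Dict String (Int ⊕ Int × Int))
    (p : String) (bits c : Int) (name : String)
    (h : ¬(name = "" ∨ PySem.Str.startswith name "/" = true)) :
    pvStepR header (res, some p, bits) (c, name)
      = ((res.insert p (Sum.inr (pvUnA (res.getD p (Sum.inl 0)), pvH header c))).insert name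
          (Sum.inl (pvH header c)), some name, pvH header c) := by
  unfold pvStepR
  split
  · rename_i hx; exact absurd hx h
  · rfl

lemma pvPendInsert (d : PySem.Dict String (Int × Int)) (p : String) (b e : Int) :
    (pvEncode d (some (p, b))).insert p
        (Sum.inr (pvUnA ((pvEncode d (some (p, b))).getD p (Sum.inl 0)), e))
      = pvMapInr (d.insert p (b, e)) := by
  rw [show pvEncode d (some (p, b)) = (pvMapInr d).insert p (Sum.inl b) from rfl]
  rw [PySem.Dict.getD_insert_self]
  rw [show pvUnA (Sum.inl b) = b from rfl]
  rw [PySem.Dict.insert_insert_self, pvMapInr_insert]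

lemma pvMain (header : List Int) : ∀ (recs : List (Int × String))
    (d : PySem.Dict String (Int × Int)) (pend : Option (String × Int)) (bits : Int),
    pvAFinal header (recs.foldl (pvStepR header)
        (pvEncode d pend, pvPrevOf pend, pvBitsOf pend bits))
      = ((pvZipN recs).foldl (pvZStep header) (pvApplyPend header d pend (pvOffHd recs))).items := by
  intro recs
  induction recs with
  | nil =>
    intro d pend bits
    cases pend with
    | none =>
      simp only [pvEncode, pvPrevOf, pvBitsOf, List.foldl_nil]
      rw [pvAFinal_none]
      rw [show pvZipN [] = [] from rfl, List.foldl_nil,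
        show pvApplyPend header d none (pvOffHd []) = d from rfl]
      exact pvItems_mapInr d
    | some pb =>
      obtain ⟨p, b⟩ := pb
      simp only [pvEncode, pvPrevOf, pvBitsOf, List.foldl_nil]
      rw [pvAFinal_some]
      rw [PySem.Dict.insert_insert_self, pvMapInr_insert]
      rw [show pvZipN [] = [] from rfl, List.foldl_nil]
      exact pvItems_mapInr _
  | cons r rest ih =>
    intro d pend bits
    obtain ⟨c, name⟩ := r
    rw [pvZipN_cons]
    simp only [List.foldl_cons]
    by_cases hcond : (name = "" ∨ PySem.Str.startswith name "/" = true)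
    · -- filler record: A closes any pending field; B's pass-2 step skips it
      rw [pvZStep_skip header _ c name (pvOffHd rest) hcond]
      cases pend with
      | none =>
        simp only [pvEncode, pvPrevOf, pvBitsOf]
        rw [pvStepR_fill_none header (pvMapInr d) bits c name hcond]
        exact ih d none bits
      | some pb =>
        obtain ⟨p, b⟩ := pb
        simp only [pvPrevOf, pvBitsOf]
        rw [pvStepR_fill_some header (pvEncode d (some (p, b))) p b c name hcond]
        rw [pvPendInsert d p b (pvH header c)]
        exact ih (d.insert p (b, pvH header c)) none b
    · -- real record: A opens a pending field; B writes the field once with lookahead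
      rw [pvZStep_real header _ c name (pvOffHd rest) hcond]
      cases pend with
      | none =>
        simp only [pvEncode, pvPrevOf, pvBitsOf]
        rw [pvStepR_real_none header (pvMapInr d) bits c name hcond]
        exact ih d (some (name, pvH header c)) bits
      | some pb =>
        obtain ⟨p, b⟩ := pb
        simp only [pvPrevOf, pvBitsOf]
        rw [pvStepR_real_some header (pvEncode d (some (p, b))) p b c name hcond]
        rw [pvPendInsert d p b (pvH header c)]
        exact ih (d.insert p (b, pvH header c)) (some (name, pvH header c)) bits

lemma pvDecodeEq (header : List Int) (line : String) :
    decode_line header line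
      = pvAFinal header ((pvRecs line).foldl (pvStepR header) (PySem.Dict.mk [], none, 0)) := by
  have h := pvBridgeA header ((PySem.Str.split? (PySem.Str.strip line) "|").getD [])
    (PySem.Dict.mk []) 0 none 0
  simp only [decode_line]
  exact congrArg (pvAFinal header) h

lemma pvAltEq (header : List Int) (line : String) :
    decode_line_alt header line
      = ((pvZipN (pvRecs line)).foldl (pvZStep header) (PySem.Dict.mk [])).items := rfl

-- ===== VERDICT (by name: the statement is the Claim_ definition above) =====
theorem decode_line_spec : Claim_equal_decode_line := by
  intro header line _ _
  show decode_line header line = decode_line_alt header line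
  rw [pvDecodeEq, pvAltEq]
  exact pvMain header (pvRecs line) (PySem.Dict.mk []) none 0
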